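-- pv_equiv track=rewrite | github.com/person142/numba_special | generate_signatures_json.py | convert_signature
-- ===== SOURCE A (Python) =====
-- import collections
--
-- SPECIAL_DOC_TO_CTYPES = {
--     'double': 'c_double',
--     'float': 'c_float',
--     'long': 'c_long'
-- }
--
-- SPECIAL_DOC_TO_CYTHON_SPECIALIZATION = {
--     'double': 'double',
--     'float': 'float',
--     'long': 'long'
-- }
--
-- def determine_fused_args(specializations):
--     arg_types = collections.defaultdict(list)
--     for args in specializations.keys():
--         for i, arg in enumerate(args):
--             arg_types[i].append(arg)
--     # These args have fused types
--     changing_args = {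
--         i: types for i, types in arg_types.items()
--         if types[1:] != types[:-1]
--     }
--     fused_args = []
--     seen_args = set()
--     for i1, types1 in changing_args.items():
--         if i1 in seen_args:
--             continue
--         seen_args.add(i1)
--
--         cluster = {i1}
--         for i2, types2 in changing_args.items():
--             if types1 == types2:
--                 # These arugments always have the same types, so they
--                 # are the same fused type.
--                 cluster.add(i2)
--                 seen_args.add(i2)
--         fused_args.append(cluster)
--
--     # Return the first occurance of a fused arg for each fused type.
--     return {min(cluster) for cluster in fused_args}
--
-- def convert_signature(specializations):
--     signatures = {}
--     fused_args = determine_fused_args(specializations)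
--     for args, return_type in specializations.items():
--         try:
--             ctypes_signature = [SPECIAL_DOC_TO_CTYPES[return_type]]
--         except KeyError:
--             continue
--         try:
--             ctypes_signature += [SPECIAL_DOC_TO_CTYPES[arg] for arg in args]
--         except KeyError:
--             continue
--
--         cython_specialization = '|'.join([
--             SPECIAL_DOC_TO_CYTHON_SPECIALIZATION[arg]
--             for i, arg in enumerate(args)
--             if i in fused_args
--         ])
--         signatures[cython_specialization] = ctypes_signature
--
--     if signatures and not fused_args:
--         signatures = {'': list(signatures.values())[0]}
--     return signatures
-- ===== SOURCE B (Python) =====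
-- SPECIAL_DOC_TO_CTYPES = {
--     'double': 'c_double',
--     'float': 'c_float',
--     'long': 'c_long'
-- }
--
-- SPECIAL_DOC_TO_CYTHON_SPECIALIZATION = {
--     'double': 'double',
--     'float': 'float',
--     'long': 'long'
-- }
--
--
-- def convert_signature(specializations):
--     # transpose the argument tuples into columns (a ragged row starts new columns)
--     cols = []
--     for args in specializations:
--         for i, arg in enumerate(args):
--             if i < len(cols):
--                 cols[i].append(arg)
--             else:
--                 cols.append([arg])
--     # hash group-by: fuse the first of each distinct non-constant column
--     fused = set()
--     seen_cols = set()
--     for i, col in enumerate(cols):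
--         t = tuple(col)
--         if len(set(col)) > 1 and t not in seen_cols:
--             seen_cols.add(t)
--             fused.add(i)
--     signatures = {}
--     for args, return_type in specializations.items():
--         if return_type in SPECIAL_DOC_TO_CTYPES and all(a in SPECIAL_DOC_TO_CTYPES for a in args):
--             spec = '|'.join(SPECIAL_DOC_TO_CYTHON_SPECIALIZATION[a]
--                             for i, a in enumerate(args) if i in fused)
--             signatures[spec] = ([SPECIAL_DOC_TO_CTYPES[return_type]]
--                                 + [SPECIAL_DOC_TO_CTYPES[a] for a in args])
--     return signatures
-- ===== Notes on version B (the rewrite author's own statement) =====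
-- stated objective: alternative
-- what changed: B transposes the argument tuples into columns once and picks the first occurrence of each distinct non-constant column with a hash-set group-by, replacing A's index-keyed defaultdict plus pairwise cluster scan with min-of-cluster; the trailing 'no fused args' special case is dropped as a provable no-op.
import Mathlib
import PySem

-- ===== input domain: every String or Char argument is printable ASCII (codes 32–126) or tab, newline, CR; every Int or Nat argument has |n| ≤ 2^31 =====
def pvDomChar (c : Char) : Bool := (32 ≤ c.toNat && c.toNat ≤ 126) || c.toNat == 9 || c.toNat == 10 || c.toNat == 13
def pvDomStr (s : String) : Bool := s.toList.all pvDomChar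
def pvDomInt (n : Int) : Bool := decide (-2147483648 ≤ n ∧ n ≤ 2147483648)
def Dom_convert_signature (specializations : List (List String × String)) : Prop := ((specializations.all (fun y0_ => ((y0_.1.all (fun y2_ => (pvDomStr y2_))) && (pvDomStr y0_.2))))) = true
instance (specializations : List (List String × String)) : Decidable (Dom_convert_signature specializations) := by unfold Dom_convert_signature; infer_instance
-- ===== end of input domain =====

-- B replaces A's pairwise clustering of argument columns (quadratic in the number of
-- argument positions) with a single hash group-by of the transposed columns (objective: alternative).

-- module constants shared by both versions
def SPECIAL_DOC_TO_CTYPES : PySem.Dict String String :=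
  PySem.Dict.ofList [("double", "c_double"), ("float", "c_float"), ("long", "c_long")]

def SPECIAL_DOC_TO_CYTHON_SPECIALIZATION : PySem.Dict String String :=
  PySem.Dict.ofList [("double", "double"), ("float", "float"), ("long", "long")]

-- ===== PORT A =====

-- port of A's determine_fused_args (pairwise clustering with min-of-cluster)
def determine_fused_args (specializations : List (List String × String)) : PySem.Set Int :=
  let arg_types : PySem.Dict Int (List String) :=
    specializations.foldl (fun d p =>
      (PySem.List.enumerate p.1).foldl
        (fun d ia => d.modify ia.1 [] (fun ts => ts ++ [ia.2])) d)
      PySem.Dict.empty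
  let changing : List (Int × List String) :=
    arg_types.items.filter
      (fun p => !(PySem.List.slice p.2 (some 1) none == PySem.List.slice p.2 none (some (-1))))
  let res :=
    changing.foldl (fun (st : List (PySem.Set Int) × PySem.Set Int) p =>
      if st.2.contains p.1 then st
      else
        let seen := st.2.add p.1
        let cs :=
          changing.foldl (fun (cs : PySem.Set Int × PySem.Set Int) q =>
              if q.2 == p.2 then (cs.1.add q.1, cs.2.add q.1) else cs)
            (PySem.Set.add PySem.Set.empty p.1, seen)
        (st.1 ++ [cs.1], cs.2))
      ([], PySem.Set.empty)
  -- {min(cluster) for cluster in fused_args}; each cluster is nonempty, so min never sees its default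
  PySem.Set.ofList (res.1.map (fun c => PySem.List.minD c (fun x => x) 0))

def convert_signature (specializations : List (List String × String)) : List (String × List String) :=
  let fused := determine_fused_args specializations
  let signatures : PySem.Dict String (List String) :=
    specializations.foldl (fun sig p =>
      match SPECIAL_DOC_TO_CTYPES.get? p.2 with
      | none => sig        -- except KeyError: continue
      | some r =>
        match p.1.mapM (fun a => SPECIAL_DOC_TO_CTYPES.get? a) with
        | none => sig      -- except KeyError: continue
        | some cargs =>
          -- lookup below is total: every arg passed the CTYPES check and the two
          -- tables have the same keys, so Python's [] never raises here
          let cy := PySem.Str.join "|"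
            (((PySem.List.enumerate p.1).filter (fun ia => fused.contains ia.1)).map
              (fun ia => SPECIAL_DOC_TO_CYTHON_SPECIALIZATION.getD ia.2 ""))
          sig.insert cy (r :: cargs))
      PySem.Dict.empty
  let signatures :=
    if signatures.items ≠ [] ∧ fused = ([] : List Int) then
      PySem.Dict.ofList [("", signatures.values.headD [])]
    else signatures
  signatures.items

-- ===== PORT B =====

def convert_signature_alt (specializations : List (List String × String)) : List (String × List String) :=
  -- cols[i].append(arg) mutates the list at index i: modelled as set i (get i ++ [arg])
  let cols : List (List String) :=
    specializations.foldl (fun cols p =>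
      (PySem.List.enumerate p.1).foldl (fun cols ia =>
        if ia.1 < PySem.List.len cols then
          PySem.List.pySetD cols ia.1 (PySem.List.pyGetD cols ia.1 [] ++ [ia.2])
        else cols ++ [[ia.2]]) cols) []
  let fs :=
    (PySem.List.enumerate cols).foldl
      (fun (st : PySem.Set Int × PySem.Set (List String)) ic =>
        if 1 < PySem.Set.len (PySem.Set.ofList ic.2) ∧ st.2.contains ic.2 = false then
          (st.1.add ic.1, st.2.add ic.2)
        else st)
      (PySem.Set.empty, PySem.Set.empty)
  let fused := fs.1
  let signatures : PySem.Dict String (List String) :=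
    specializations.foldl (fun sig p =>
      if SPECIAL_DOC_TO_CTYPES.contains p.2 ∧ p.1.all (fun a => SPECIAL_DOC_TO_CTYPES.contains a) then
        let spec := PySem.Str.join "|"
          (((PySem.List.enumerate p.1).filter (fun ia => fused.contains ia.1)).map
            (fun ia => SPECIAL_DOC_TO_CYTHON_SPECIALIZATION.getD ia.2 ""))
        sig.insert spec (SPECIAL_DOC_TO_CTYPES.getD p.2 "" :: p.1.map (fun a => SPECIAL_DOC_TO_CTYPES.getD a ""))
      else sig)
      PySem.Dict.empty
  signatures.items

-- ===== PRECONDITION & SPEC =====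
-- Pre_ excludes association lists with duplicate argument tuples: A's parameter is a
-- Python dict, which cannot hold two entries with the same key.
def Pre_convert_signature (specializations : List (List String × String)) : Prop :=
  (specializations.map Prod.fst).Nodup
instance (specializations : List (List String × String)) : Decidable (Pre_convert_signature specializations) := by unfold Pre_convert_signature; infer_instance

def pvWitness_convert_signature : (List (List String × String)) :=
  [(["double", "double"], "double"), (["double", "long"], "double")]

def Spec_convert_signature (specializations : List (List String × String)) (out : List (String × List String)) : Prop := out = convert_signature_alt specializations
instance (specializations : List (List String × String)) (out : List (String × List String)) : Decidable (Spec_convert_signature specializations out) := by unfold Spec_convert_signature; infer_instance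

-- ===== CLAIM (what is proved, stated in full; the proofs are below) =====
def Claim_equal_convert_signature : Prop := ∀ (specializations : List (List String × String)), Dom_convert_signature specializations → Pre_convert_signature specializations → Spec_convert_signature specializations (convert_signature specializations)

-- ===== LEMMAS AND PROOFS =====
-- ---------- generic utilities ----------

theorem pv_enum_nil {α : Type} (j : Int) : PySem.List.enumerate ([] : List α) j = [] := rfl

theorem pv_enum_cons {α : Type} (x : α) (l : List α) (j : Int) :
    PySem.List.enumerate (x :: l) j = (j, x) :: PySem.List.enumerate l (j + 1) := rfl

theorem pv_enum_key_le {α : Type} (l : List α) :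
    ∀ (j : Int), ∀ q ∈ PySem.List.enumerate l j, j ≤ q.1 := by
  induction l with
  | nil => intro j q hq; simp at hq
  | cons x t ih =>
    intro j q hq
    rw [pv_enum_cons, List.mem_cons] at hq
    rcases hq with hq | hq
    · simp [hq]
    · have := ih (j + 1) q hq; omega

theorem pv_enum_pairwise {α : Type} (l : List α) :
    ∀ (j : Int), (PySem.List.enumerate l j).Pairwise (fun a b => a.1 < b.1) := by
  induction l with
  | nil => intro j; simp
  | cons x t ih =>
    intro j
    rw [pv_enum_cons]
    refine List.Pairwise.cons ?_ (ih (j + 1))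
    intro q hq
    have := pv_enum_key_le t (j + 1) q hq
    simp; omega

-- closed structural form of B's _add_row
def addRowCore : List (List String) → List String → List (List String)
  | cols, [] => cols
  | [], a :: as => [a] :: addRowCore [] as
  | c :: cs, a :: as => (c ++ [a]) :: addRowCore cs as

theorem pv_set_at_append (pre rest : List (List String)) (v : List String) (x : List String) :
    (pre ++ x :: rest).set pre.length v = pre ++ v :: rest := by
  induction pre with
  | nil => rfl
  | cons p t ih => simpa [List.set] using ih

theorem pv_getD_at_append (pre rest : List (List String)) (x : List String) :
    (pre ++ x :: rest).getD pre.length [] = x := by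
  simp [List.getD]

theorem pv_setrow (args : List String) :
    ∀ (j : Nat) (pre rest : List (List String)),
    pre.length = j →
    (PySem.List.enumerate args (j : Int)).foldl (fun cols ia =>
        if ia.1 < PySem.List.len cols then
          PySem.List.pySetD cols ia.1 (PySem.List.pyGetD cols ia.1 [] ++ [ia.2])
        else cols ++ [[ia.2]]) (pre ++ rest)
    = pre ++ addRowCore rest args := by
  induction args with
  | nil =>
    intro j pre rest _
    cases rest <;> rfl
  | cons a as ih =>
    intro j pre rest hj
    rw [pv_enum_cons, List.foldl_cons]
    have hcast : ((j : Int) + 1) = ((j + 1 : Nat) : Int) := by push_cast; ring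
    cases rest with
    | nil =>
      rw [List.append_nil]
      rw [if_neg (by rw [PySem.List.len_eq, hj]; omega)]
      rw [hcast]
      have hrec := ih (j + 1) (pre ++ [[a]]) [] (by simp [hj])
      rw [List.append_nil] at hrec
      rw [hrec]
      show _ = pre ++ addRowCore ([] : List (List String)) (a :: as)
      rw [show addRowCore ([] : List (List String)) (a :: as) = [a] :: addRowCore [] as from rfl]
      simp
    | cons c rest' =>
      rw [if_pos (by rw [PySem.List.len_eq]; simp; omega)]
      rw [show ((j : Int), a).1 = (j : Int) from rfl, show ((j : Int), a).2 = a from rfl]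
      rw [PySem.List.pyGetD_natCast, PySem.List.pySetD_natCast]
      rw [← hj, pv_getD_at_append pre rest' c, pv_set_at_append pre rest' (c ++ [a]) c]
      rw [hj, hcast]
      have hrec := ih (j + 1) (pre ++ [c ++ [a]]) rest' (by simp [hj])
      rw [show (pre ++ [c ++ [a]]) ++ rest' = pre ++ (c ++ [a]) :: rest' by simp] at hrec
      rw [hrec]
      rw [show addRowCore (c :: rest') (a :: as) = (c ++ [a]) :: addRowCore rest' as from rfl]
      simp

theorem pv_cols_eq (specializations : List (List String × String)) :
    specializations.foldl (fun cols p =>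
      (PySem.List.enumerate p.1).foldl (fun cols ia =>
        if ia.1 < PySem.List.len cols then
          PySem.List.pySetD cols ia.1 (PySem.List.pyGetD cols ia.1 [] ++ [ia.2])
        else cols ++ [[ia.2]]) cols) []
    = specializations.foldl (fun cols p => addRowCore cols p.1) [] := by
  suffices h : ∀ (rows : List (List String × String)) (cols : List (List String)),
      rows.foldl (fun cols p =>
        (PySem.List.enumerate p.1).foldl (fun cols ia =>
          if ia.1 < PySem.List.len cols then
            PySem.List.pySetD cols ia.1 (PySem.List.pyGetD cols ia.1 [] ++ [ia.2])
          else cols ++ [[ia.2]]) cols) cols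
      = rows.foldl (fun cols p => addRowCore cols p.1) cols from h specializations []
  intro rows
  induction rows with
  | nil => intro cols; rfl
  | cons r rs ih =>
    intro cols
    rw [List.foldl_cons, List.foldl_cons]
    have step := pv_setrow r.1 0 [] cols (by simp)
    rw [List.nil_append, List.nil_append] at step
    rw [show ((0 : Nat) : Int) = (0 : Int) from rfl] at step
    rw [step]
    exact ih (addRowCore cols r.1)

theorem pv_get?_mk_append (pre rest : List (Int × List String)) (j : Int)
    (h : ∀ q ∈ pre, q.1 ≠ j) :
    (PySem.Dict.mk (pre ++ rest)).get? j = (PySem.Dict.mk rest).get? j := by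
  induction pre with
  | nil => rfl
  | cons q t ih =>
    rw [List.cons_append, PySem.Dict.get?_mk_cons]
    have hq : q.1 ≠ j := h q (by simp)
    simp only [beq_iff_eq, hq, if_false]
    exact ih (fun p hp => h p (by simp [hp]))

theorem pv_modify_present (pre : List (Int × List String)) (j : Int) (c : List String)
    (tail : List (Int × List String)) (f : List String → List String)
    (hpre : ∀ q ∈ pre, q.1 ≠ j) (htail : ∀ q ∈ tail, q.1 ≠ j) :
    PySem.Dict.modify (PySem.Dict.mk (pre ++ (j, c) :: tail)) j [] f
      = PySem.Dict.mk (pre ++ (j, f c) :: tail) := by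
  have hget : (PySem.Dict.mk (pre ++ (j, c) :: tail)).get? j = some c := by
    rw [pv_get?_mk_append pre _ j hpre, PySem.Dict.get?_mk_cons]; simp
  have hc : (PySem.Dict.mk (pre ++ (j, c) :: tail)).contains j = true := by
    rw [PySem.Dict.contains_eq_isSome_get?, hget]; rfl
  rw [PySem.Dict.modify, PySem.Dict.getD_eq_get?_getD, hget]
  rw [PySem.Dict.insert, if_pos hc]
  congr 1
  rw [List.map_append, List.map_cons]
  have hmap : ∀ (l : List (Int × List String)), (∀ q ∈ l, q.1 ≠ j) → ∀ (v : List String),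
      l.map (fun p => if (p.1 == j) = true then (j, v) else p) = l := by
    intro l hl v
    rw [List.map_congr_left (g := id) ?_, List.map_id]
    intro q hq; simp [hl q hq]
  rw [hmap pre hpre, hmap tail htail]
  simp

theorem pv_modify_absent (pre : List (Int × List String)) (j : Int) (f : List String → List String)
    (hpre : ∀ q ∈ pre, q.1 ≠ j) :
    PySem.Dict.modify (PySem.Dict.mk pre) j [] f = PySem.Dict.mk (pre ++ [(j, f [])]) := by
  have hget : (PySem.Dict.mk pre).get? j = none := by
    have := pv_get?_mk_append pre [] j hpre
    simpa using this
  have hc : (PySem.Dict.mk pre).contains j = false := by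
    rw [PySem.Dict.contains_eq_isSome_get?, hget]; rfl
  rw [PySem.Dict.modify, PySem.Dict.getD_eq_get?_getD, hget]
  rw [PySem.Dict.insert, hc]
  simp

theorem pv_modify_row (args : List String) :
    ∀ (j : Int) (pre : List (Int × List String)) (rest : List (List String)),
    (∀ q ∈ pre, q.1 < j) →
    (PySem.List.enumerate args j).foldl
      (fun d ia => PySem.Dict.modify d ia.1 [] (fun ts => ts ++ [ia.2]))
      (PySem.Dict.mk (pre ++ PySem.List.enumerate rest j))
    = PySem.Dict.mk (pre ++ PySem.List.enumerate (addRowCore rest args) j) := by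
  induction args with
  | nil =>
    intro j pre rest h
    cases rest <;> rfl
  | cons a as ih =>
    intro j pre rest hpre
    rw [pv_enum_cons, List.foldl_cons]
    cases rest with
    | nil =>
      rw [pv_enum_nil, List.append_nil]
      rw [pv_modify_absent pre j _ (fun q hq => by have := hpre q hq; omega)]
      have hv : ([] : List String) ++ [((j, a) : Int × String).2] = [a] := rfl
      rw [hv]
      have hrec := ih (j + 1) (pre ++ [(j, [a])]) []
        (by intro q hq
            rw [List.mem_append] at hq
            rcases hq with hq | hq
            · have := hpre q hq; omega
            · simp at hq; simp [hq])
      simp only [pv_enum_nil, List.append_nil] at hrec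
      rw [hrec]
      show _ = PySem.Dict.mk (pre ++ PySem.List.enumerate ([a] :: addRowCore [] as) j)
      rw [pv_enum_cons]
      congr 1
      simp
    | cons c cs =>
      rw [pv_enum_cons]
      rw [show pre ++ (j, c) :: PySem.List.enumerate cs (j + 1)
            = pre ++ (j, c) :: PySem.List.enumerate cs (j + 1) from rfl]
      rw [pv_modify_present pre j c (PySem.List.enumerate cs (j + 1)) _
            (fun q hq => by have := hpre q hq; omega)
            (fun q hq => by have := pv_enum_key_le cs (j + 1) q hq; omega)]
      have hv : c ++ [((j, a) : Int × String).2] = c ++ [a] := rfl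
      rw [hv]
      have hrec := ih (j + 1) (pre ++ [(j, c ++ [a])]) cs
        (by intro q hq
            rw [List.mem_append] at hq
            rcases hq with hq | hq
            · have := hpre q hq; omega
            · simp at hq; simp [hq])
      rw [show pre ++ (j, c ++ [a]) :: PySem.List.enumerate cs (j + 1)
            = (pre ++ [(j, c ++ [a])]) ++ PySem.List.enumerate cs (j + 1) by simp]
      rw [hrec]
      show _ = PySem.Dict.mk (pre ++ PySem.List.enumerate ((c ++ [a]) :: addRowCore cs as) j)
      rw [pv_enum_cons]
      congr 1
      simp

theorem pv_arg_types_items (specializations : List (List String × String)) :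
    (specializations.foldl (fun d p =>
        (PySem.List.enumerate p.1).foldl
          (fun d ia => PySem.Dict.modify d ia.1 [] (fun ts => ts ++ [ia.2])) d)
      PySem.Dict.empty).items
    = PySem.List.enumerate (specializations.foldl (fun cols p => addRowCore cols p.1) []) 0 := by
  suffices h : ∀ (rows : List (List String × String)) (cols : List (List String)),
      (rows.foldl (fun d p =>
          (PySem.List.enumerate p.1).foldl
            (fun d ia => PySem.Dict.modify d ia.1 [] (fun ts => ts ++ [ia.2])) d)
        (PySem.Dict.mk (PySem.List.enumerate cols 0)))
      = PySem.Dict.mk (PySem.List.enumerate (rows.foldl (fun cols p => addRowCore cols p.1) cols) 0) by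
    have := h specializations []
    rw [show (PySem.Dict.empty : PySem.Dict Int (List String))
          = PySem.Dict.mk (PySem.List.enumerate ([] : List (List String)) 0) from rfl]
    rw [this]
  intro rows
  induction rows with
  | nil => intro cols; rfl
  | cons r rs ih =>
    intro cols
    rw [List.foldl_cons, List.foldl_cons]
    have step := pv_modify_row r.1 0 [] cols (by intro q hq; simp at hq)
    simp only [List.nil_append] at step
    rw [step]
    exact ih (addRowCore cols r.1)

theorem pv_allEq_iff_tail_eq (col : List String) :
    (col.tail = col.dropLast) ↔ (∀ a ∈ col, ∀ b ∈ col, a = b) := by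
  induction col with
  | nil => simp
  | cons x xs ih =>
    cases xs with
    | nil => simp
    | cons y t =>
      constructor
      · intro h a ha b hb
        have hd : (x :: y :: t).dropLast = x :: (y :: t).dropLast := rfl
        rw [List.tail_cons, hd, List.cons.injEq] at h
        obtain ⟨hxy, ht⟩ := h
        have hall : ∀ a ∈ y :: t, ∀ b ∈ y :: t, a = b := by
          apply ih.mp
          rw [List.tail_cons]
          exact ht
        have hx : ∀ a ∈ x :: y :: t, a ∈ y :: t ∨ a = x := by
          intro a ha
          rcases List.mem_cons.mp ha with h | h
          · right; exact h
          · left; exact h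
        rcases hx a ha with ha' | ha' <;> rcases hx b hb with hb' | hb'
        · exact hall a ha' b hb'
        · rw [hb', ← hxy]; exact hall a ha' y (by simp)
        · rw [ha', ← hxy]; exact (hall b hb' y (by simp)).symm
        · rw [ha', hb']
      · intro h
        have hd : (x :: y :: t).dropLast = x :: (y :: t).dropLast := rfl
        rw [List.tail_cons, hd, List.cons.injEq]
        constructor
        · exact h y (by simp) x (by simp)
        · have ht : (y :: t).tail = t := rfl
          rw [← ht]
          apply ih.mpr
          intro a ha b hb
          exact h a (by simp [ha]) b (by simp [hb])

theorem pv_set_card_iff (col : List String) :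
    (1 < PySem.Set.len (PySem.Set.ofList col)) ↔ ¬(∀ a ∈ col, ∀ b ∈ col, a = b) := by
  rw [PySem.Set.len]
  constructor
  · intro h hall
    have hlen : 1 < (PySem.Set.ofList col).length := by exact_mod_cast h
    obtain ⟨a, b, t, hab⟩ : ∃ a b t, PySem.Set.ofList col = a :: b :: t := by
      cases hc : PySem.Set.ofList col with
      | nil => rw [hc] at hlen; simp at hlen
      | cons a s =>
        cases s with
        | nil => rw [hc] at hlen; simp at hlen
        | cons b t => exact ⟨a, b, t, rfl⟩
    have hnd := PySem.Set.nodup_ofList col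
    rw [hab] at hnd
    have hane : a ≠ b := by
      intro hcontra
      rw [List.nodup_cons] at hnd
      exact hnd.1 (by simp [hcontra])
    have ha : a ∈ col := (PySem.Set.mem_ofList col a).mp (by rw [hab]; simp)
    have hb : b ∈ col := (PySem.Set.mem_ofList col b).mp (by rw [hab]; simp)
    exact hane (hall a ha b hb)
  · intro h
    push Not at h
    obtain ⟨a, ha, b, hb, hab⟩ := h
    have ha' : a ∈ PySem.Set.ofList col := (PySem.Set.mem_ofList col a).mpr ha
    have hb' : b ∈ PySem.Set.ofList col := (PySem.Set.mem_ofList col b).mpr hb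
    have : 1 < (PySem.Set.ofList col).length := by
      by_contra hle
      push Not at hle
      interval_cases h : (PySem.Set.ofList col).length
      · rw [List.length_eq_zero_iff] at h
        rw [h] at ha'; simp at ha'
      · rw [List.length_eq_one_iff] at h
        obtain ⟨x, hx⟩ := h
        rw [hx] at ha' hb'
        simp at ha' hb'
        exact hab (ha'.trans hb'.symm)
    exact_mod_cast this

theorem pv_test_eq (col : List String) :
    (!(PySem.List.slice col (some 1) none == PySem.List.slice col none (some (-1))))
      = decide (1 < PySem.Set.len (PySem.Set.ofList col)) := by
  rw [PySem.List.slice_from_one, PySem.List.slice_to_neg_one]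
  by_cases h : ∀ a ∈ col, ∀ b ∈ col, a = b
  · have h1 : col.tail = col.dropLast := (pv_allEq_iff_tail_eq col).mpr h
    have h2 : ¬(1 < PySem.Set.len (PySem.Set.ofList col)) := fun hc => (pv_set_card_iff col).mp hc h
    have e1 : (col.tail == col.dropLast) = true := by simp [h1]
    rw [e1, decide_eq_false h2]
    rfl
  · have h1 : col.tail ≠ col.dropLast := fun hc => h ((pv_allEq_iff_tail_eq col).mp hc)
    have h2 : 1 < PySem.Set.len (PySem.Set.ofList col) := (pv_set_card_iff col).mpr h
    have e1 : (col.tail == col.dropLast) = false := by simp [h1]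
    rw [e1, decide_eq_true h2]
    rfl

theorem pv_bfold_filter (l : List (Int × List String)) (st : PySem.Set Int × PySem.Set (List String)) :
    l.foldl (fun st ic =>
        if 1 < PySem.Set.len (PySem.Set.ofList ic.2) ∧ st.2.contains ic.2 = false then
          (st.1.add ic.1, st.2.add ic.2)
        else st) st
    = (l.filter (fun ic => decide (1 < PySem.Set.len (PySem.Set.ofList ic.2)))).foldl
        (fun st ic =>
          if st.2.contains ic.2 = false then (st.1.add ic.1, st.2.add ic.2) else st) st := by
  induction l generalizing st with
  | nil => rfl
  | cons q l ih =>
    rw [List.foldl_cons, List.filter_cons]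
    by_cases hp : 1 < PySem.Set.len (PySem.Set.ofList q.2)
    · by_cases hs : st.2.contains q.2 = false
      · rw [if_pos ⟨hp, hs⟩, decide_eq_true hp, if_pos rfl, List.foldl_cons, if_pos hs]
        exact ih _
      · have hs' : st.2.contains q.2 = true := by revert hs; cases st.2.contains q.2 <;> simp
        rw [if_neg (fun hc => hs hc.2), decide_eq_true hp, if_pos rfl, List.foldl_cons,
          if_neg hs]
        exact ih st
    · rw [if_neg (fun hc => hp hc.1), decide_eq_false hp, if_neg (by simp)]
      exact ih st

theorem pv_bool_ext {a b : Bool} (h : a = true ↔ b = true) : a = b := by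
  cases a <;> cases b <;> simp_all

theorem pv_scontains {α : Type} [BEq α] [LawfulBEq α] (s : PySem.Set α) (x : α) :
    s.contains x = true ↔ x ∈ s :=
  List.contains_iff_mem

theorem pv_set_add_ne_nil {α : Type} [BEq α] (s : PySem.Set α) (x : α) :
    PySem.Set.add s x ≠ [] := by
  rw [PySem.Set.add]
  split
  · next hc =>
    intro h
    rw [h] at hc
    simp [PySem.Set.contains] at hc
  · simp

theorem pv_minD_eq (s : List Int) (m : Int) (hm : m ∈ s) (hle : ∀ y ∈ s, m ≤ y) :
    PySem.List.minD s (fun x => x) 0 = m := by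
  rw [PySem.List.minD]
  cases h : PySem.List.min? s (fun x => x) with
  | none =>
    rw [PySem.List.min?_eq_none_iff] at h
    rw [h] at hm
    simp at hm
  | some m' =>
    have h1 := PySem.List.min?_mem h
    have h2 := PySem.List.min?_isMin h
    simpa using le_antisymm (h2 m hm) (hle m' h1)

theorem pv_key_inj {L : List (Int × List String)} (hnd : (L.map Prod.fst).Nodup)
    {p q : Int × List String} (hp : p ∈ L) (hq : q ∈ L) (h : p.1 = q.1) : p = q := by
  exact List.inj_on_of_nodup_map hnd hp hq h

-- A's outer clustering step (the inner scan runs over the full list L)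
def pvStepA (L : List (Int × List String)) (st : List (PySem.Set Int) × PySem.Set Int)
    (p : Int × List String) : List (PySem.Set Int) × PySem.Set Int :=
  if st.2.contains p.1 then st
  else
    let seen := st.2.add p.1
    let cs :=
      L.foldl (fun cs q =>
          if q.2 == p.2 then (cs.1.add q.1, cs.2.add q.1) else cs)
        (PySem.Set.add PySem.Set.empty p.1, seen)
    (st.1 ++ [cs.1], cs.2)

-- B's group-by step (over the pre-filtered changing columns)
def pvStepB (st : PySem.Set Int × PySem.Set (List String)) (ic : Int × List String) :
    PySem.Set Int × PySem.Set (List String) :=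
  if st.2.contains ic.2 = false then (st.1.add ic.1, st.2.add ic.2) else st

theorem pv_inner_fold (p2 : List String) :
    ∀ (L : List (Int × List String)) (c0 s0 : PySem.Set Int),
    L.foldl (fun cs q => if q.2 == p2 then (cs.1.add q.1, cs.2.add q.1) else cs) (c0, s0)
    = (PySem.Set.update c0 ((L.filter (fun q => q.2 == p2)).map Prod.fst),
       PySem.Set.update s0 ((L.filter (fun q => q.2 == p2)).map Prod.fst)) := by
  intro L
  induction L with
  | nil => intro c0 s0; rfl
  | cons q l ih =>
    intro c0 s0
    rw [List.foldl_cons, List.filter_cons]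
    by_cases h : (q.2 == p2) = true
    · rw [if_pos h, if_pos h, List.map_cons]
      rw [show PySem.Set.update c0 (q.1 :: (List.filter (fun q => q.2 == p2) l).map Prod.fst)
            = PySem.Set.update (c0.add q.1) ((List.filter (fun q => q.2 == p2) l).map Prod.fst) from rfl]
      rw [show PySem.Set.update s0 (q.1 :: (List.filter (fun q => q.2 == p2) l).map Prod.fst)
            = PySem.Set.update (s0.add q.1) ((List.filter (fun q => q.2 == p2) l).map Prod.fst) from rfl]
      exact ih (c0.add q.1) (s0.add q.1)
    · rw [if_neg h, if_neg (by simpa using h)]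
      exact ih c0 s0

theorem pv_fused_core (L : List (Int × List String))
    (hpw : L.Pairwise (fun a b => a.1 < b.1)) :
    ∀ (S P : List (Int × List String)) (clusters : List (PySem.Set Int))
      (seenA : PySem.Set Int) (fusedB : PySem.Set Int) (seenT : PySem.Set (List String)),
    L = P ++ S →
    (∀ i : Int, seenA.contains i = true ↔ ∃ q ∈ L, q.1 = i ∧ seenT.contains q.2 = true) →
    (∀ t : List String, seenT.contains t = true ↔ t ∈ P.map Prod.snd) →
    (∀ i : Int,
      (PySem.Set.ofList (clusters.map (fun c => PySem.List.minD c (fun x => x) 0))).contains i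
        = fusedB.contains i) →
    (clusters = [] ↔ fusedB = []) →
    (∀ i : Int,
      (PySem.Set.ofList
        ((S.foldl (pvStepA L) (clusters, seenA)).1.map (fun c => PySem.List.minD c (fun x => x) 0))).contains i
        = (S.foldl pvStepB (fusedB, seenT)).1.contains i)
    ∧ ((S.foldl (pvStepA L) (clusters, seenA)).1 = [] ↔ (S.foldl pvStepB (fusedB, seenT)).1 = []) := by
  have hnd : (L.map Prod.fst).Nodup := by
    refine List.Nodup.of_map id ?_
    rw [List.map_id]
    exact (List.pairwise_map.mpr hpw).imp (fun h => by exact fun he => absurd he (by omega))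
  intro S
  induction S with
  | nil =>
    intro P clusters seenA fusedB seenT hL h2 h3 h4 h5
    exact ⟨h4, h5⟩
  | cons p S' ih =>
    intro P clusters seenA fusedB seenT hL h2 h3 h4 h5
    have hpL : p ∈ L := by rw [hL]; simp
    have hskip : seenA.contains p.1 = true ↔ seenT.contains p.2 = true := by
      constructor
      · intro h
        obtain ⟨q, hq, hq1, hq2⟩ := (h2 p.1).mp h
        have := pv_key_inj hnd hq hpL hq1
        rw [← this]
        exact hq2
      · intro h
        exact (h2 p.1).mpr ⟨p, hpL, rfl, h⟩
    rw [List.foldl_cons, List.foldl_cons]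
    by_cases hT : seenT.contains p.2 = true
    · have hA : seenA.contains p.1 = true := hskip.mpr hT
      rw [show pvStepA L (clusters, seenA) p = (clusters, seenA) by
            rw [pvStepA, if_pos (show (clusters, seenA).2.contains p.1 = true from hA)]]
      rw [show pvStepB (fusedB, seenT) p = (fusedB, seenT) by
            rw [pvStepB, if_neg (show ¬((fusedB, seenT).2.contains p.2 = false) by
              show ¬(seenT.contains p.2 = false); rw [hT]; simp)]]
      refine ih (P ++ [p]) clusters seenA fusedB seenT (by rw [hL]; simp) h2 ?_ h4 h5
      intro t
      rw [h3 t, List.map_append, List.mem_append]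
      constructor
      · intro h; left; exact h
      · rintro (h | h)
        · exact h
        · simp at h
          rw [h]
          exact (h3 p.2).mp hT
    · have hF : seenT.contains p.2 = false := by revert hT; cases seenT.contains p.2 <;> simp
      have hAf : ¬(seenA.contains p.1 = true) := fun h => hT (hskip.mp h)
      have hstepA : pvStepA L (clusters, seenA) p
          = (clusters ++ [PySem.Set.update (PySem.Set.add PySem.Set.empty p.1)
                ((L.filter (fun q => q.2 == p.2)).map Prod.fst)],
             PySem.Set.update (seenA.add p.1)
                ((L.filter (fun q => q.2 == p.2)).map Prod.fst)) := by
        rw [pvStepA, if_neg (show ¬((clusters, seenA).2.contains p.1 = true) from hAf)]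
        simp only [pv_inner_fold]
      have hstepB : pvStepB (fusedB, seenT) p = (fusedB.add p.1, seenT.add p.2) := by
        rw [pvStepB, if_pos hF]
      rw [hstepA, hstepB]
      -- notation
      set Ms := (L.filter (fun q => q.2 == p.2)).map Prod.fst with hMs
      have hMsmem : ∀ y, y ∈ Ms → ∃ q ∈ L, q.2 = p.2 ∧ q.1 = y := by
        intro y hy
        rw [hMs, List.mem_map] at hy
        obtain ⟨q, hq, hqy⟩ := hy
        rw [List.mem_filter] at hq
        exact ⟨q, hq.1, by simpa using hq.2, hqy⟩
      have hPnotp : ∀ q ∈ P, q.2 ≠ p.2 := by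
        intro q hq hc
        have : seenT.contains q.2 = true := (h3 q.2).mpr (by rw [List.mem_map]; exact ⟨q, hq, rfl⟩)
        rw [hc, hF] at this
        exact absurd this (by simp)
      have hmin : PySem.List.minD
          (PySem.Set.update (PySem.Set.add PySem.Set.empty p.1) Ms) (fun x => x) 0 = p.1 := by
        apply pv_minD_eq
        · exact (PySem.Set.mem_update _ _ _).mpr
            (Or.inl ((PySem.Set.mem_add _ _ _).mpr (Or.inr rfl)))
        · intro y hy
          rcases (PySem.Set.mem_update _ _ _).mp hy with hy | hy
          · rcases (PySem.Set.mem_add _ _ _).mp hy with hy | hy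
            · exact absurd hy (by simp [PySem.Set.empty])
            · omega
          · obtain ⟨q, hqL, hq2, hq1⟩ := hMsmem y hy
            rw [hL] at hqL
            rcases List.mem_append.mp hqL with hq | hq
            · exact absurd hq2 (hPnotp q hq)
            · rcases List.mem_cons.mp hq with hq | hq
              · rw [hq] at hq1; omega
              · have hsub : (p :: S').Pairwise (fun a b => a.1 < b.1) := by
                  have hsl : List.Sublist (p :: S') L := by
                    rw [hL]; exact List.sublist_append_right P (p :: S')
                  exact hpw.sublist hsl
                have := (List.pairwise_cons.mp hsub).1 q hq
                omega
      refine ih (P ++ [p])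
        (clusters ++ [PySem.Set.update (PySem.Set.add PySem.Set.empty p.1) Ms])
        (PySem.Set.update (seenA.add p.1) Ms)
        (fusedB.add p.1) (seenT.add p.2)
        (by rw [hL]; simp) ?_ ?_ ?_ ?_
      · -- H2'
        intro i
        constructor
        · intro h
          have h' : i ∈ PySem.Set.update (seenA.add p.1) Ms := (pv_scontains _ _).mp h
          rcases (PySem.Set.mem_update _ _ _).mp h' with h' | h'
          · rcases (PySem.Set.mem_add _ _ _).mp h' with h' | h'
            · obtain ⟨q, hqL, hq1, hq2⟩ := (h2 i).mp ((pv_scontains _ _).mpr h')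
              refine ⟨q, hqL, hq1, ?_⟩
              exact (pv_scontains _ _).mpr ((PySem.Set.mem_add _ _ _).mpr
                (Or.inl ((pv_scontains _ _).mp hq2)))
            · exact ⟨p, hpL, h'.symm, (pv_scontains _ _).mpr
                ((PySem.Set.mem_add _ _ _).mpr (Or.inr rfl))⟩
          · obtain ⟨q, hqL, hq2, hq1⟩ := hMsmem i h'
            exact ⟨q, hqL, hq1, (pv_scontains _ _).mpr
              ((PySem.Set.mem_add _ _ _).mpr (Or.inr hq2))⟩
        · rintro ⟨q, hqL, hq1, hq2⟩
          have hq2' := (pv_scontains _ _).mp hq2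
          apply (pv_scontains _ _).mpr
          apply (PySem.Set.mem_update _ _ _).mpr
          rcases (PySem.Set.mem_add _ _ _).mp hq2' with h' | h'
          · left
            apply (PySem.Set.mem_add _ _ _).mpr
            left
            exact (pv_scontains _ _).mp ((h2 i).mpr ⟨q, hqL, hq1, (pv_scontains _ _).mpr h'⟩)
          · right
            rw [hMs, List.mem_map]
            refine ⟨q, ?_, hq1⟩
            rw [List.mem_filter]
            exact ⟨hqL, by simpa using h'⟩
      · -- H3'
        intro t
        rw [List.map_append, List.mem_append]
        constructor
        · intro h
          rcases (PySem.Set.mem_add _ _ _).mp ((pv_scontains _ _).mp h) with h | h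
          · left; exact (h3 t).mp ((pv_scontains _ _).mpr h)
          · right; simp [h]
        · rintro (h | h)
          · exact (pv_scontains _ _).mpr ((PySem.Set.mem_add _ _ _).mpr
              (Or.inl ((pv_scontains _ _).mp ((h3 t).mpr h))))
          · simp at h
            exact (pv_scontains _ _).mpr ((PySem.Set.mem_add _ _ _).mpr (Or.inr h))
      · -- H4'
        intro i
        apply pv_bool_ext
        rw [List.map_append, List.map_cons, List.map_nil, hmin]
        rw [pv_scontains, pv_scontains, PySem.Set.mem_ofList, PySem.Set.mem_add]
        rw [List.mem_append]
        have hprev : i ∈ clusters.map (fun c => PySem.List.minD c (fun x => x) 0) ↔ i ∈ fusedB := by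
          rw [← PySem.Set.mem_ofList (α := Int), ← pv_scontains, ← pv_scontains
              (α := Int) fusedB i, h4 i]
        constructor
        · rintro (h | h)
          · left; exact hprev.mp h
          · right; simpa using h
        · rintro (h | h)
          · left; exact hprev.mpr h
          · right; simp [h]
      · -- H5'
        constructor
        · intro h; simp at h
        · intro h; exact absurd h (pv_set_add_ne_nil fusedB p.1)

def pvSigStepA (fused : PySem.Set Int) (sig : PySem.Dict String (List String))
    (p : List String × String) : PySem.Dict String (List String) :=
  match SPECIAL_DOC_TO_CTYPES.get? p.2 with
  | none => sig
  | some r =>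
    match p.1.mapM (fun a => SPECIAL_DOC_TO_CTYPES.get? a) with
    | none => sig
    | some cargs =>
      let cy := PySem.Str.join "|"
        (((PySem.List.enumerate p.1).filter (fun ia => fused.contains ia.1)).map
          (fun ia => SPECIAL_DOC_TO_CYTHON_SPECIALIZATION.getD ia.2 ""))
      sig.insert cy (r :: cargs)

def pvSigStep (fused : PySem.Set Int) (sig : PySem.Dict String (List String))
    (p : List String × String) : PySem.Dict String (List String) :=
  if SPECIAL_DOC_TO_CTYPES.contains p.2 ∧ p.1.all (fun a => SPECIAL_DOC_TO_CTYPES.contains a) then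
    sig.insert
      (PySem.Str.join "|"
        (((PySem.List.enumerate p.1).filter (fun ia => fused.contains ia.1)).map
          (fun ia => SPECIAL_DOC_TO_CYTHON_SPECIALIZATION.getD ia.2 "")))
      (SPECIAL_DOC_TO_CTYPES.getD p.2 "" :: p.1.map (fun a => SPECIAL_DOC_TO_CTYPES.getD a ""))
  else sig

theorem pv_mapM_some (d : PySem.Dict String String) :
    ∀ (l : List String), l.all (fun a => d.contains a) = true →
    l.mapM (fun a => d.get? a) = some (l.map (fun a => d.getD a "")) := by
  intro l
  induction l with
  | nil => intro _; rfl
  | cons a t ih =>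
    intro h
    rw [List.all_cons, Bool.and_eq_true] at h
    have hc := h.1
    rw [PySem.Dict.contains_eq_isSome_get?] at hc
    obtain ⟨v, hv⟩ := Option.isSome_iff_exists.mp hc
    rw [List.mapM_cons, hv, ih h.2]
    simp [PySem.Dict.getD_eq_get?_getD, hv]

theorem pv_mapM_none (d : PySem.Dict String String) :
    ∀ (l : List String), l.all (fun a => d.contains a) = false →
    l.mapM (fun a => d.get? a) = none := by
  intro l
  induction l with
  | nil => intro h; simp at h
  | cons a t ih =>
    intro h
    rw [List.all_cons, Bool.and_eq_false_iff] at h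
    rcases h with h | h
    · rw [PySem.Dict.contains_eq_isSome_get?, Option.isSome_eq_false_iff,
        Option.isNone_iff_eq_none] at h
      rw [List.mapM_cons, h]
      rfl
    · rw [List.mapM_cons, ih h]
      cases d.get? a <;> rfl

theorem pv_sig_step (fA fB : PySem.Set Int) (hf : ∀ i, fA.contains i = fB.contains i) :
    pvSigStepA fA = pvSigStep fB := by
  funext sig p
  have hfilter : (PySem.List.enumerate p.1).filter (fun ia => fA.contains ia.1)
      = (PySem.List.enumerate p.1).filter (fun ia => fB.contains ia.1) :=
    List.filter_congr (fun x _ => hf x.1)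
  rw [pvSigStepA, pvSigStep]
  cases hr : SPECIAL_DOC_TO_CTYPES.get? p.2 with
  | none =>
    have hcont : SPECIAL_DOC_TO_CTYPES.contains p.2 = false := by
      rw [PySem.Dict.contains_eq_isSome_get?, hr]; rfl
    simp [hcont]
  | some r =>
    have hcont : SPECIAL_DOC_TO_CTYPES.contains p.2 = true := by
      rw [PySem.Dict.contains_eq_isSome_get?, hr]; rfl
    cases hall : p.1.all (fun a => SPECIAL_DOC_TO_CTYPES.contains a) with
    | false =>
      rw [pv_mapM_none _ _ hall]
      simp
    | true =>
      rw [pv_mapM_some _ _ hall]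
      have hr' : SPECIAL_DOC_TO_CTYPES.getD p.2 "" = r := by
        rw [PySem.Dict.getD_eq_get?_getD, hr]; rfl
      rw [hfilter]
      simp [hcont, hr']

theorem pv_insert_empty_key (sig : PySem.Dict String (List String)) (v : List String)
    (h : sig.items = [] ∨ ∃ w, sig.items = [("", w)]) :
    (sig.insert "" v).items = [("", v)] := by
  obtain ⟨l⟩ := sig
  rcases h with h | ⟨w, h⟩ <;> simp only at h <;> subst h
  · rw [PySem.Dict.insert]
    rw [if_neg (by rw [PySem.Dict.contains_mk]; simp)]
    rfl
  · rw [PySem.Dict.insert]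
    rw [if_pos (by rw [PySem.Dict.contains_mk]; simp)]
    simp

theorem pv_sig_shape (fB : PySem.Set Int) (hfB : ∀ i, fB.contains i = false) :
    ∀ (rows : List (List String × String)) (sig : PySem.Dict String (List String)),
    (sig.items = [] ∨ ∃ v, sig.items = [("", v)]) →
    ((rows.foldl (pvSigStep fB) sig).items = []
      ∨ ∃ v, (rows.foldl (pvSigStep fB) sig).items = [("", v)]) := by
  intro rows
  induction rows with
  | nil => intro sig h; exact h
  | cons p t ih =>
    intro sig h
    rw [List.foldl_cons]
    apply ih
    rw [pvSigStep]
    split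
    · have hkey : PySem.Str.join "|"
          (((PySem.List.enumerate p.1).filter (fun ia => fB.contains ia.1)).map
            (fun ia => SPECIAL_DOC_TO_CYTHON_SPECIALIZATION.getD ia.2 "")) = "" := by
        rw [show (PySem.List.enumerate p.1).filter (fun ia => fB.contains ia.1) = [] by
              apply List.filter_eq_nil_iff.mpr
              intro x _
              rw [hfB x.1]
              simp]
        rfl
      rw [hkey]
      right
      exact ⟨_, pv_insert_empty_key sig _ h⟩
    · exact h

def pvColsB (specs : List (List String × String)) : List (List String) :=
  specs.foldl (fun cols p =>
    (PySem.List.enumerate p.1).foldl (fun cols ia =>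
      if ia.1 < PySem.List.len cols then
        PySem.List.pySetD cols ia.1 (PySem.List.pyGetD cols ia.1 [] ++ [ia.2])
      else cols ++ [[ia.2]]) cols) []

def pvLB (specs : List (List String × String)) : List (Int × List String) :=
  (PySem.List.enumerate (pvColsB specs) 0).filter
    (fun p => decide (1 < PySem.Set.len (PySem.Set.ofList p.2)))

def pvChangingA (specs : List (List String × String)) : List (Int × List String) :=
  ((specs.foldl (fun d p =>
      (PySem.List.enumerate p.1).foldl
        (fun d ia => PySem.Dict.modify d ia.1 [] (fun ts => ts ++ [ia.2])) d)
    PySem.Dict.empty).items).filter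
    (fun p => !(PySem.List.slice p.2 (some 1) none == PySem.List.slice p.2 none (some (-1))))

def pvFusedA (specs : List (List String × String)) : PySem.Set Int :=
  PySem.Set.ofList
    (((pvChangingA specs).foldl (pvStepA (pvChangingA specs)) ([], PySem.Set.empty)).1.map
      (fun c => PySem.List.minD c (fun x => x) 0))

def pvFusedB0 (specs : List (List String × String)) : PySem.Set Int :=
  ((PySem.List.enumerate (pvColsB specs) 0).foldl
    (fun (st : PySem.Set Int × PySem.Set (List String)) ic =>
      if 1 < PySem.Set.len (PySem.Set.ofList ic.2) ∧ st.2.contains ic.2 = false then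
        (st.1.add ic.1, st.2.add ic.2)
      else st)
    (PySem.Set.empty, PySem.Set.empty)).1

theorem pv_chg_filter (l : List (Int × List String)) :
    l.filter (fun p => !(PySem.List.slice p.2 (some 1) none == PySem.List.slice p.2 none (some (-1))))
    = l.filter (fun p => decide (1 < PySem.Set.len (PySem.Set.ofList p.2))) :=
  List.filter_congr (fun x _ => pv_test_eq x.2)

theorem pvChangingA_eq (specs : List (List String × String)) :
    pvChangingA specs = pvLB specs := by
  rw [pvChangingA, pv_arg_types_items, pv_chg_filter, pvLB, pvColsB, pv_cols_eq]

theorem pvFusedB0_eq (specs : List (List String × String)) :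
    pvFusedB0 specs = ((pvLB specs).foldl pvStepB (PySem.Set.empty, PySem.Set.empty)).1 := by
  rw [pvFusedB0, pv_bfold_filter]
  rfl

theorem pv_ofList_eq_nil {α : Type} [BEq α] [LawfulBEq α] (xs : List α) :
    PySem.Set.ofList xs = [] ↔ xs = [] := by
  constructor
  · intro h
    cases xs with
    | nil => rfl
    | cons x t =>
      have hx : x ∈ PySem.Set.ofList (x :: t) := (PySem.Set.mem_ofList _ _).mpr (by simp)
      rw [h] at hx
      simp at hx
  · intro h; rw [h]; rfl

theorem pv_A_named (specs : List (List String × String)) :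
    convert_signature specs =
    (if (specs.foldl (pvSigStepA (pvFusedA specs)) PySem.Dict.empty).items ≠ []
        ∧ pvFusedA specs = ([] : List Int) then
      PySem.Dict.ofList
        [("", (specs.foldl (pvSigStepA (pvFusedA specs)) PySem.Dict.empty).values.headD [])]
    else specs.foldl (pvSigStepA (pvFusedA specs)) PySem.Dict.empty).items := rfl

theorem pv_B_named (specs : List (List String × String)) :
    convert_signature_alt specs =
    (specs.foldl (pvSigStep (pvFusedB0 specs)) PySem.Dict.empty).items := rfl

-- ===== VERDICT (by name: the statement is the Claim_ definition above) =====
theorem convert_signature_spec : Claim_equal_convert_signature := by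
  intro specs _ _
  show convert_signature specs = convert_signature_alt specs
  rw [pv_A_named, pv_B_named]
  have hpwL : (pvLB specs).Pairwise (fun a b => a.1 < b.1) :=
    (pv_enum_pairwise (pvColsB specs) 0).sublist List.filter_sublist
  have hcore := pv_fused_core (pvLB specs) hpwL (pvLB specs) [] [] PySem.Set.empty
    PySem.Set.empty PySem.Set.empty
    (by simp)
    (by intro i
        constructor
        · intro h; exact absurd h (by simp [PySem.Set.contains, PySem.Set.empty])
        · rintro ⟨q, _, _, h⟩; exact absurd h (by simp [PySem.Set.contains, PySem.Set.empty]))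
    (by intro t
        constructor
        · intro h; exact absurd h (by simp [PySem.Set.contains, PySem.Set.empty])
        · intro h; simp at h)
    (fun _ => rfl)
    ⟨fun _ => rfl, fun _ => rfl⟩
  obtain ⟨hmem0, hnil0⟩ := hcore
  have hmem : ∀ i, (pvFusedA specs).contains i = (pvFusedB0 specs).contains i := by
    intro i
    rw [pvFusedB0_eq]
    simp only [pvFusedA, pvChangingA_eq]
    exact hmem0 i
  have hnil : pvFusedA specs = ([] : List Int) ↔ pvFusedB0 specs = ([] : List Int) := by
    rw [pvFusedB0_eq]
    simp only [pvFusedA, pvChangingA_eq]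
    rw [pv_ofList_eq_nil, List.map_eq_nil_iff]
    exact hnil0
  have hsig := pv_sig_step (pvFusedA specs) (pvFusedB0 specs) hmem
  rw [hsig]
  by_cases hA : pvFusedA specs = ([] : List Int)
  · have hB : pvFusedB0 specs = ([] : List Int) := hnil.mp hA
    have hfB : ∀ i, (pvFusedB0 specs).contains i = false := by
      intro i; rw [hB]; rfl
    have hshape := pv_sig_shape (pvFusedB0 specs) hfB specs PySem.Dict.empty (Or.inl rfl)
    rcases hshape with hsh | ⟨v, hsh⟩
    · rw [if_neg (fun hc => hc.1 hsh)]
    · rw [if_pos ⟨by rw [hsh]; simp, hA⟩, hsh]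
      have hv : (specs.foldl (pvSigStep (pvFusedB0 specs)) PySem.Dict.empty).values = [v] := by
        simp [PySem.Dict.values, hsh]
      rw [hv]
      rfl
  · rw [if_neg (fun hc => hA hc.2)]
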